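-- pv_equiv track=rewrite | github.com/nickh2000/EMTF_BDT | Compressor.py | getNLBdPhi
-- ===== SOURCE A (Python) =====
-- dPhiNLBMap_4bit_256Max = [0, 1, 2, 3, 4, 6, 8, 10, 12, 16, 20, 25, 31, 46, 68, 136]
--
-- dPhiNLBMap_5bit_256Max = [0,  1,  2,  3,  4,  5,  6,  7,  8,  9,  10, 11, 12, 13, 14, 15, 16, 17, 19, 20, 21, 23, 25, 28, 31, 34, 39, 46, 55, 68, 91, 136]
--
-- dPhiNLBMap_7bit_512Max = [
--     0,   1,   2,   3,   4,   5,   6,   7,   8,   9,   10,  11,  12,  13,  14,  15,  16,  17,  18,  19,  20,  21,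
--     22,  23,  24,  25,  26,  27,  28,  29,  30,  31,  32,  33,  34,  35,  36,  37,  38,  39,  40,  41,  42,  43,
--     44,  45,  46,  47,  48,  49,  50,  51,  52,  53,  54,  55,  56,  57,  58,  59,  60,  61,  62,  63,  64,  65,
--     66,  67,  68,  69,  71,  72,  73,  74,  75,  76,  77,  79,  80,  81,  83,  84,  86,  87,  89,  91,  92,  94,
--     96,  98,  100, 102, 105, 107, 110, 112, 115, 118, 121, 124, 127, 131, 135, 138, 143, 147, 152, 157, 162, 168,
--     174, 181, 188, 196, 204, 214, 224, 235, 247, 261, 276, 294, 313, 336, 361, 391, 427, 470]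
--
-- def getNLBdPhi(dPhi, bits, max):
--         dPhi_ = max
--         sign_ = 1
--         if dPhi < 0:
--             sign_ = -1
--         dPhi = sign_ * dPhi
--
--         if max == 256:
--             if bits == 4:
--                 dPhi_ = dPhiNLBMap_4bit_256Max[(1 << bits) - 1]
--                 for edge in range ((1 << bits) - 1):
--                     if dPhiNLBMap_4bit_256Max[edge] <= dPhi and dPhiNLBMap_4bit_256Max[edge + 1] > dPhi:
--                         dPhi_= dPhiNLBMap_4bit_256Max[edge]
--             if bits == 5:
--                 dPhi_ = dPhiNLBMap_5bit_256Max[(1 << bits) - 1]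
--                 for edge in range((1 << bits) - 1):
--                     if dPhiNLBMap_5bit_256Max[edge] <= dPhi and dPhiNLBMap_5bit_256Max[edge + 1] > dPhi:
--                         dPhi_ = dPhiNLBMap_5bit_256Max[edge]
--         elif max == 512:
--             if bits == 7:
--                 dPhi_ = dPhiNLBMap_7bit_512Max[(1 << bits) - 1]
--                 for edge in range((1 << bits) - 1):
--                     if dPhiNLBMap_7bit_512Max[edge] <= dPhi and dPhiNLBMap_7bit_512Max[edge + 1] > dPhi:
--                         dPhi_ = dPhiNLBMap_7bit_512Max[edge]
--
--
--         return sign_ * dPhi_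
-- ===== SOURCE B (Python) =====
-- _T4 = [0, 1, 2, 3, 4, 6, 8, 10, 12, 16, 20, 25, 31, 46, 68, 136]
-- _T5 = [0, 1, 2, 3, 4, 5, 6, 7, 8, 9, 10, 11, 12, 13, 14, 15, 16, 17, 19, 20,
--        21, 23, 25, 28, 31, 34, 39, 46, 55, 68, 91, 136]
-- _T7 = [
--     0,   1,   2,   3,   4,   5,   6,   7,   8,   9,   10,  11,  12,  13,  14,  15,  16,  17,  18,  19,  20,  21,
--     22,  23,  24,  25,  26,  27,  28,  29,  30,  31,  32,  33,  34,  35,  36,  37,  38,  39,  40,  41,  42,  43,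
--     44,  45,  46,  47,  48,  49,  50,  51,  52,  53,  54,  55,  56,  57,  58,  59,  60,  61,  62,  63,  64,  65,
--     66,  67,  68,  69,  71,  72,  73,  74,  75,  76,  77,  79,  80,  81,  83,  84,  86,  87,  89,  91,  92,  94,
--     96,  98,  100, 102, 105, 107, 110, 112, 115, 118, 121, 124, 127, 131, 135, 138, 143, 147, 152, 157, 162, 168,
--     174, 181, 188, 196, 204, 214, 224, 235, 247, 261, 276, 294, 313, 336, 361, 391, 427, 470]
--
-- def getNLBdPhi(dPhi, bits, max):
--     sign = -1 if dPhi < 0 else 1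
--     a = sign * dPhi
--     if (max, bits) == (256, 4):
--         t = _T4
--     elif (max, bits) == (256, 5):
--         t = _T5
--     elif (max, bits) == (512, 7):
--         t = _T7
--     else:
--         return sign * max
--     # binary search for the rightmost edge <= a (t[0] == 0 <= a always)
--     lo, hi = 0, len(t) - 1
--     while lo < hi:
--         mid = (lo + hi + 1) // 2
--         if t[mid] <= a:
--             lo = mid
--         else:
--             hi = mid - 1
--     return sign * t[lo]
-- ===== Notes on version B (the rewrite author's own statement) =====
-- stated objective: alternative
-- what changed: B replaces A's linear scan over every edge of the selected nonlinear bit-map table by a binary search for the rightmost edge <= |dPhi| (with the same sign handling and the same fall-through of sign*max for unhandled (max, bits) combinations).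
import Mathlib
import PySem

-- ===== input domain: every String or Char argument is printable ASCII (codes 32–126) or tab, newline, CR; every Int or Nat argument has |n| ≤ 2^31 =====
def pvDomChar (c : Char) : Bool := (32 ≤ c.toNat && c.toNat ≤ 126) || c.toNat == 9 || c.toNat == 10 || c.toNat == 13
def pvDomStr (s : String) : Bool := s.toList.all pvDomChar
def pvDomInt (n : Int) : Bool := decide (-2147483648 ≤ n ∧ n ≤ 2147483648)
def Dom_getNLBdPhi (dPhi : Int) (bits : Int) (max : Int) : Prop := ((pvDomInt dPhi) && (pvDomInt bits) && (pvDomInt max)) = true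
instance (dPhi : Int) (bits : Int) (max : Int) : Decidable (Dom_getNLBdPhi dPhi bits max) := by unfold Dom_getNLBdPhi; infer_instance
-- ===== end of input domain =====

-- B replaces A's linear scan over the bit-map edges by a binary search for the
-- rightmost edge ≤ |dPhi| (alternative algorithm; same values everywhere).

-- module constants shared by both ports (same-module lists in the Python source)
def dPhiNLBMap_4bit_256Max : List Int := [0, 1, 2, 3, 4, 6, 8, 10, 12, 16, 20, 25, 31, 46, 68, 136]

def dPhiNLBMap_5bit_256Max : List Int := [0, 1, 2, 3, 4, 5, 6, 7, 8, 9, 10, 11, 12, 13, 14, 15, 16, 17, 19, 20, 21, 23, 25, 28, 31, 34, 39, 46, 55, 68, 91, 136]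

def dPhiNLBMap_7bit_512Max : List Int := [
    0,   1,   2,   3,   4,   5,   6,   7,   8,   9,   10,  11,  12,  13,  14,  15,  16,  17,  18,  19,  20,  21,
    22,  23,  24,  25,  26,  27,  28,  29,  30,  31,  32,  33,  34,  35,  36,  37,  38,  39,  40,  41,  42,  43,
    44,  45,  46,  47,  48,  49,  50,  51,  52,  53,  54,  55,  56,  57,  58,  59,  60,  61,  62,  63,  64,  65,
    66,  67,  68,  69,  71,  72,  73,  74,  75,  76,  77,  79,  80,  81,  83,  84,  86,  87,  89,  91,  92,  94,
    96,  98,  100, 102, 105, 107, 110, 112, 115, 118, 121, 124, 127, 131, 135, 138, 143, 147, 152, 157, 162, 168,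
    174, 181, 188, 196, 204, 214, 224, 235, 247, 261, 276, 294, 313, 336, 361, 391, 427, 470]

-- ===== PORT A =====
-- A's per-table body: dPhi_ = t[(1<<bits)-1]; for edge in range((1<<bits)-1): if t[edge] <= dPhi < t[edge+1]: dPhi_ = t[edge]
-- (identical in all three branches of A, factored with the table and bits as parameters; indices are always in
--  range for the tables used, so pyGetD with default 0 is exact)
def pvScanA (t : List Int) (bits : Int) (d : Int) : Int :=
  (PySem.List.pyRange 0 ((1 <<< bits.toNat) - 1) 1).foldl
    (fun acc e =>
      if PySem.List.pyGetD t e 0 ≤ d ∧ PySem.List.pyGetD t (e + 1) 0 > d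
      then PySem.List.pyGetD t e 0 else acc)
    (PySem.List.pyGetD t ((1 <<< bits.toNat) - 1) 0)

def getNLBdPhi (dPhi : Int) (bits : Int) (max : Int) : Int :=
  let dPhi_ : Int := max
  let sign_ : Int := if dPhi < 0 then -1 else 1
  let dPhi := sign_ * dPhi
  let dPhi_ :=
    if max = 256 then
      -- the two sequential 'if bits == 4' / 'if bits == 5' are mutually exclusive
      if bits = 4 then pvScanA dPhiNLBMap_4bit_256Max bits dPhi
      else if bits = 5 then pvScanA dPhiNLBMap_5bit_256Max bits dPhi
      else dPhi_
    else if max = 512 then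
      if bits = 7 then pvScanA dPhiNLBMap_7bit_512Max bits dPhi
      else dPhi_
    else dPhi_
  sign_ * dPhi_

-- ===== PORT B =====
-- B's while-loop: lo, hi are nonnegative Python ints throughout (0 ≤ lo ≤ hi ≤ len(t)-1), so Nat with
-- Nat division matches Python's //; t[mid] is always in range, so pyGetD with default 0 is exact.
def pvBsLoop (t : List Int) (a : Int) (lo hi : Nat) : Nat :=
  if lo < hi then
    let mid := (lo + hi + 1) / 2
    if PySem.List.pyGetD t (mid : Int) 0 ≤ a then pvBsLoop t a mid hi
    else pvBsLoop t a lo (mid - 1)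
  else lo
termination_by hi - lo
decreasing_by all_goals omega

def pvQuant (t : List Int) (a : Int) : Int :=
  PySem.List.pyGetD t ((pvBsLoop t a 0 (t.length - 1) : Nat) : Int) 0

def getNLBdPhi_alt (dPhi : Int) (bits : Int) (max : Int) : Int :=
  let sign : Int := if dPhi < 0 then -1 else 1
  let a := sign * dPhi
  if max = 256 ∧ bits = 4 then sign * pvQuant dPhiNLBMap_4bit_256Max a
  else if max = 256 ∧ bits = 5 then sign * pvQuant dPhiNLBMap_5bit_256Max a
  else if max = 512 ∧ bits = 7 then sign * pvQuant dPhiNLBMap_7bit_512Max a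
  else sign * max

-- ===== PRECONDITION & SPEC =====
def Spec_getNLBdPhi (dPhi : Int) (bits : Int) (max : Int) (out : Int) : Prop := out = getNLBdPhi_alt dPhi bits max
instance (dPhi : Int) (bits : Int) (max : Int) (out : Int) : Decidable (Spec_getNLBdPhi dPhi bits max out) := by unfold Spec_getNLBdPhi; infer_instance

-- ===== CLAIM (what is proved, stated in full; the proofs are below) =====
def Claim_equal_getNLBdPhi : Prop := ∀ (dPhi : Int) (bits : Int) (max : Int), Dom_getNLBdPhi dPhi bits max → Spec_getNLBdPhi dPhi bits max (getNLBdPhi dPhi bits max)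

-- ===== LEMMAS AND PROOFS =====

-- a fold whose update condition never fires returns its initial accumulator
theorem pvFoldlIfSkip (f : Int → Int) (P : Int → Prop) [DecidablePred P]
    (l : List Int) (init : Int) (h : ∀ e ∈ l, ¬ P e) :
    l.foldl (fun acc e => if P e then f e else acc) init = init := by
  induction l generalizing init with
  | nil => rfl
  | cons x xs ih =>
    simp only [List.foldl_cons]
    rw [if_neg (h x (by simp))]
    exact ih init (fun e he => h e (by simp [he]))

-- A's scan returns t[idx] whenever idx is the rightmost index with t[idx] ≤ a
theorem pvScanEq (t : List Int) (a : Int) (m idx : Nat)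
    (hadj : ∀ i < m, t.getD i 0 < t.getD (i + 1) 0)
    (hidx : idx ≤ m)
    (hle : t.getD idx 0 ≤ a)
    (hgt : idx = m ∨ a < t.getD (idx + 1) 0) :
    (PySem.List.pyRange 0 (m : Int) 1).foldl
      (fun acc e =>
        if PySem.List.pyGetD t e 0 ≤ a ∧ PySem.List.pyGetD t (e + 1) 0 > a
        then PySem.List.pyGetD t e 0 else acc)
      (t.getD m 0) = t.getD idx 0 := by
  have hmono : ∀ i j : Nat, i < j → j ≤ m → t.getD i 0 < t.getD j 0 := by
    intro i j
    induction j with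
    | zero => intro h _; omega
    | succ j ih =>
      intro hij hj
      rcases Nat.lt_or_ge i j with h | h
      · exact lt_trans (ih h (by omega)) (hadj j (by omega))
      · have hij' : i = j := by omega
        subst hij'; exact hadj i (by omega)
  have hcondN : ∀ k : Nat, k < m → ((t.getD k 0 ≤ a ∧ t.getD (k + 1) 0 > a) ↔ k = idx) := by
    intro k hk
    constructor
    · rintro ⟨hl, hr⟩
      by_contra hne
      rcases Nat.lt_or_ge k idx with hlt | hge
      · have : t.getD (k + 1) 0 ≤ t.getD idx 0 := by
          rcases Nat.lt_or_ge (k + 1) idx with h | h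
          · exact le_of_lt (hmono _ _ h hidx)
          · have hh : k + 1 = idx := by omega
            rw [hh]
        omega
      · rcases hgt with h | h
        · omega
        · have : t.getD (idx + 1) 0 ≤ t.getD k 0 := by
            rcases Nat.lt_or_ge (idx + 1) k with hh | hh
            · exact le_of_lt (hmono _ _ hh (by omega))
            · have hh' : idx + 1 = k := by omega
              rw [hh']
          omega
    · rintro rfl
      rcases hgt with h | h
      · omega
      · exact ⟨hle, h⟩
  have hcond : ∀ e : Int, 0 ≤ e → e < (m : Int) →
      ((PySem.List.pyGetD t e 0 ≤ a ∧ PySem.List.pyGetD t (e + 1) 0 > a) ↔ e = (idx : Int)) := by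
    intro e he hem
    obtain ⟨k, rfl⟩ : ∃ k : Nat, e = (k : Int) := ⟨e.toNat, by omega⟩
    have h1 : ((k : Int)) + 1 = ((k + 1 : Nat) : Int) := by push_cast; ring
    rw [h1, PySem.List.pyGetD_natCast, PySem.List.pyGetD_natCast, Int.natCast_inj]
    exact hcondN k (by omega)
  rcases Nat.lt_or_ge idx m with hlt | hge
  · -- idx < m : split the range at idx; the condition holds exactly at idx
    have h2 : PySem.List.pyRange (idx : Int) (m : Int) 1 =
        (idx : Int) :: PySem.List.pyRange ((idx : Int) + 1) (m : Int) 1 :=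
      PySem.List.pyRange_one_cons (show (idx : Int) < (m : Int) by omega)
    have hsplit : PySem.List.pyRange 0 (m : Int) 1 =
        PySem.List.pyRange 0 (idx : Int) 1 ++ ((idx : Int) :: PySem.List.pyRange ((idx : Int) + 1) (m : Int) 1) := by
      rw [PySem.List.pyRange_one_append 0 (idx : Int) (m : Int) (by omega) (by omega), h2]
    rw [hsplit, List.foldl_append, List.foldl_cons]
    rw [pvFoldlIfSkip (fun e => PySem.List.pyGetD t e 0)
      (fun e => PySem.List.pyGetD t e 0 ≤ a ∧ PySem.List.pyGetD t (e + 1) 0 > a)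
      (PySem.List.pyRange ((idx : Int) + 1) (m : Int) 1) _ (by
        intro e he hc
        rw [PySem.List.mem_pyRange_one] at he
        simp only [hcond e (by omega) he.2] at hc
        omega)]
    exact (if_pos ((hcond (idx : Int) (by omega) (by omega)).mpr rfl)).trans
      (PySem.List.pyGetD_natCast t idx 0)
  · -- idx = m : the condition never fires and the initial value t[m] is the answer
    have hidxm : idx = m := by omega
    rw [pvFoldlIfSkip (fun e => PySem.List.pyGetD t e 0)
      (fun e => PySem.List.pyGetD t e 0 ≤ a ∧ PySem.List.pyGetD t (e + 1) 0 > a)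
      (PySem.List.pyRange 0 (m : Int) 1) _ (by
        intro e he hc
        rw [PySem.List.mem_pyRange_one] at he
        simp only [hcond e he.1 he.2] at hc
        omega)]
    rw [hidxm]

-- invariant of B's binary search: it lands on the rightmost index with t[idx] ≤ a
theorem pvBsInv (t : List Int) (a : Int) (m : Nat) :
    ∀ k lo hi, hi - lo ≤ k → lo ≤ hi → hi ≤ m →
      t.getD lo 0 ≤ a → (hi = m ∨ a < t.getD (hi + 1) 0) →
      lo ≤ pvBsLoop t a lo hi ∧ pvBsLoop t a lo hi ≤ hi ∧
      t.getD (pvBsLoop t a lo hi) 0 ≤ a ∧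
      (pvBsLoop t a lo hi = m ∨ a < t.getD (pvBsLoop t a lo hi + 1) 0) := by
  intro k
  induction k with
  | zero =>
    intro lo hi hk hle hm h0 h1
    have : lo = hi := by omega
    subst this
    rw [pvBsLoop, if_neg (by omega)]
    exact ⟨le_refl _, le_refl _, h0, h1⟩
  | succ k ih =>
    intro lo hi hk hle hm h0 h1
    rw [pvBsLoop]
    by_cases hlh : lo < hi
    · rw [if_pos hlh]
      simp only []
      set mid := (lo + hi + 1) / 2 with hmid
      have hmid1 : lo < mid := by omega
      have hmid2 : mid ≤ hi := by omega
      by_cases hc : PySem.List.pyGetD t (mid : Int) 0 ≤ a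
      · rw [if_pos hc]
        have hcd : t.getD mid 0 ≤ a := by
          rwa [PySem.List.pyGetD_natCast] at hc
        have := ih mid hi (by omega) (by omega) hm hcd h1
        exact ⟨by omega, this.2.1, this.2.2.1, this.2.2.2⟩
      · rw [if_neg hc]
        have hcd : a < t.getD mid 0 := by
          rw [PySem.List.pyGetD_natCast] at hc; omega
        have hstep : a < t.getD ((mid - 1) + 1) 0 := by
          have : (mid - 1) + 1 = mid := by omega
          rwa [this]
        have := ih lo (mid - 1) (by omega) (by omega) (by omega) h0 (Or.inr hstep)
        exact ⟨this.1, by omega, this.2.2.1, this.2.2.2⟩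
    · rw [if_neg hlh]
      have : lo = hi := by omega
      subst this
      exact ⟨le_refl _, le_refl _, h0, h1⟩

-- per-table equivalence of A's scan and B's binary search, for 0 ≤ a
theorem pvTableEq (t : List Int) (bits : Int) (a : Int) (m : Nat)
    (hlen : t.length = m + 1)
    (hbits : (1 <<< bits.toNat) - 1 = (m : Int))
    (hadj : ∀ i < m, t.getD i 0 < t.getD (i + 1) 0)
    (h0 : t.getD 0 0 ≤ a) :
    pvScanA t bits a = pvQuant t a := by
  have hinv := pvBsInv t a m m 0 m (by omega) (by omega) (le_refl m) h0 (Or.inl rfl)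
  set r := pvBsLoop t a 0 m with hr
  unfold pvScanA pvQuant
  rw [hbits, hlen]
  have hm1 : m + 1 - 1 = m := by omega
  rw [hm1, ← hr]
  simp only [PySem.List.pyGetD_natCast]
  exact pvScanEq t a m r hadj hinv.2.1 hinv.2.2.1 hinv.2.2.2

-- a linear Boolean strict-ascent check, evaluated once per table by rfl
def pvChk : List Int → Bool
  | a :: b :: r => decide (a < b) && pvChk (b :: r)
  | _ => true

theorem pvChk_adj : ∀ (l : List Int), pvChk l = true →
    ∀ i, i + 1 < l.length → l.getD i 0 < l.getD (i + 1) 0 := by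
  intro l
  induction l with
  | nil => intro _ i hi; simp at hi
  | cons x xs ih =>
    cases xs with
    | nil => intro _ i hi; simp at hi
    | cons y r =>
      intro h i hi
      rw [pvChk, Bool.and_eq_true, decide_eq_true_eq] at h
      cases i with
      | zero => simpa [List.getD] using h.1
      | succ i => exact ih h.2 i (by simpa using hi)

theorem pvAdj4 : ∀ i < 15, dPhiNLBMap_4bit_256Max.getD i 0 < dPhiNLBMap_4bit_256Max.getD (i + 1) 0 :=
  fun i hi => pvChk_adj dPhiNLBMap_4bit_256Max (by rfl) i (by simp [dPhiNLBMap_4bit_256Max]; omega)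
theorem pvAdj5 : ∀ i < 31, dPhiNLBMap_5bit_256Max.getD i 0 < dPhiNLBMap_5bit_256Max.getD (i + 1) 0 :=
  fun i hi => pvChk_adj dPhiNLBMap_5bit_256Max (by rfl) i (by simp [dPhiNLBMap_5bit_256Max]; omega)
theorem pvAdj7 : ∀ i < 127, dPhiNLBMap_7bit_512Max.getD i 0 < dPhiNLBMap_7bit_512Max.getD (i + 1) 0 :=
  fun i hi => pvChk_adj dPhiNLBMap_7bit_512Max (by rfl) i (by simp [dPhiNLBMap_7bit_512Max]; omega)

-- ===== VERDICT (by name: the statement is the Claim_ definition above) =====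
theorem getNLBdPhi_spec : Claim_equal_getNLBdPhi := by
  intro dPhi bits max _
  unfold Spec_getNLBdPhi getNLBdPhi getNLBdPhi_alt
  simp only []
  set sign : Int := if dPhi < 0 then -1 else 1 with hsign
  have ha : 0 ≤ sign * dPhi := by
    rw [hsign]; split_ifs with h <;> nlinarith
  have h4 : ∀ hb : bits = 4, pvScanA dPhiNLBMap_4bit_256Max bits (sign * dPhi)
      = pvQuant dPhiNLBMap_4bit_256Max (sign * dPhi) := by
    rintro rfl
    exact pvTableEq _ 4 _ 15 (by rfl) (by decide) (fun i hi => pvAdj4 i hi) (by rw [show dPhiNLBMap_4bit_256Max.getD 0 0 = 0 from rfl]; exact ha)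
  have h5 : ∀ hb : bits = 5, pvScanA dPhiNLBMap_5bit_256Max bits (sign * dPhi)
      = pvQuant dPhiNLBMap_5bit_256Max (sign * dPhi) := by
    rintro rfl
    exact pvTableEq _ 5 _ 31 (by rfl) (by decide) (fun i hi => pvAdj5 i hi) (by rw [show dPhiNLBMap_5bit_256Max.getD 0 0 = 0 from rfl]; exact ha)
  have h7 : ∀ hb : bits = 7, pvScanA dPhiNLBMap_7bit_512Max bits (sign * dPhi)
      = pvQuant dPhiNLBMap_7bit_512Max (sign * dPhi) := by
    rintro rfl
    exact pvTableEq _ 7 _ 127 (by rfl) (by decide) (fun i hi => pvAdj7 i hi) (by rw [show dPhiNLBMap_7bit_512Max.getD 0 0 = 0 from rfl]; exact ha)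
  by_cases hm : max = 256
  · by_cases hb4 : bits = 4
    · simp [hm, hb4, hb4 ▸ h4 hb4]
    · by_cases hb5 : bits = 5
      · simp [hm, hb5, hb5 ▸ h5 hb5]
      · simp [hm, hb4, hb5]
  · by_cases hm5 : max = 512
    · by_cases hb7 : bits = 7
      · simp [hm5, hb7, hb7 ▸ h7 hb7]
      · simp [hm5, hb7]
    · simp [hm, hm5]
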